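-- pv_equiv track=rewrite | github.com/Znerual/KakuroGenerator | python/generate_book.py | get_active_board_bounds
-- ===== SOURCE A (Python) =====
-- def get_active_board_bounds(board_json, cell_size):
--     """
--     Calculates the bounding box of the ACTUAL drawn cells (excluding whitespace/skipped cells).
--     This allows us to draw a nice border around the puzzle or center it perfectly.
--     Returns: (min_col, max_col, min_row, max_row) indices
--     """
--     grid = board_json['grid']
--     min_r, max_r = len(grid), -1
--     min_c, max_c = len(grid[0]), -1
--
--     found_any = False
--
--     for r, row in enumerate(grid):
--         for c, cell in enumerate(row):
--             clue_h = int(cell.get('clue_h', 0))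
--             clue_v = int(cell.get('clue_v', 0))
--             ctype = str(cell.get('type', 'white')).upper()
--
--             # If it's a visible cell
--             if ctype in ["WHITE", "INPUT"] or clue_h > 0 or clue_v > 0:
--                 min_r = min(min_r, r)
--                 max_r = max(max_r, r)
--                 min_c = min(min_c, c)
--                 max_c = max(max_c, c)
--                 found_any = True
--
--     if not found_any:
--         return 0, 0, 0, 0
--
--     return min_c, max_c, min_r, max_r
-- ===== SOURCE B (Python) =====
-- def _visible(cell):
--     clue_h = int(cell.get('clue_h', 0))
--     clue_v = int(cell.get('clue_v', 0))
--     ctype = str(cell.get('type', 'white')).upper()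
--     return ctype in ["WHITE", "INPUT"] or clue_h > 0 or clue_v > 0
--
-- def get_active_board_bounds(board_json, cell_size):
--     grid = board_json['grid']
--     mask = [[_visible(cell) for cell in row] for row in grid]
--     rows = [r for r in range(len(mask)) if any(mask[r])]
--     if not rows:
--         return 0, 0, 0, 0
--     width = max(len(row) for row in mask)
--     cols = [c for c in range(width) if any(c < len(row) and row[c] for row in mask)]
--     return cols[0], cols[-1], rows[0], rows[-1]
-- ===== Notes on version B (the rewrite author's own statement) =====
-- stated objective: alternative
-- what changed: Replaces A's single row-major pass with running min/max accumulators by a staged, axis-separated computation: build a boolean visibility mask, take the first/last index of the active-row list, and scan the grid column-by-column (a transposed traversal over range(width)) taking the first/last active column index; no min/max accumulators at all.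
-- intended difference: On ragged grids that contain a visible cell but where every visible cell's column index exceeds len(grid[0]), A returns min_col = len(grid[0]) (its stale initial value, the column of no cell) while B returns the true minimum visible column, which is the intended bounding box. — e.g. on get_active_board_bounds([("grid", [[], [[("type", "block")], [("type", "white")]]])], 0): A returns (0, 1, 1, 1), B returns (1, 1, 1, 1)
import Mathlib
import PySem

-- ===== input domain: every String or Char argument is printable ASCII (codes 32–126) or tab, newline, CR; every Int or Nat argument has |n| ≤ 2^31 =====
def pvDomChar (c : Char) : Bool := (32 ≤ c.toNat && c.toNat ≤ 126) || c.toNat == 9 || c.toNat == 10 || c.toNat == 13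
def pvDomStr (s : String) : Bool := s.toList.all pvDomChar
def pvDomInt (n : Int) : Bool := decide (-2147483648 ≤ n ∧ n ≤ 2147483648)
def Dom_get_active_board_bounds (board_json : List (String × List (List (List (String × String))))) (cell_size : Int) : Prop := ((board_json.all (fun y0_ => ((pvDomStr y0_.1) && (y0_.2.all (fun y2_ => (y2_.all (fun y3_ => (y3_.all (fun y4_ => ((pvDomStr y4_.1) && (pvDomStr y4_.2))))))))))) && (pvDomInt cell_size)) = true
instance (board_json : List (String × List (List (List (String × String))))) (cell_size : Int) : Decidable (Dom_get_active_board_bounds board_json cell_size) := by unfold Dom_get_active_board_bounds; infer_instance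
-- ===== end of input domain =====

-- B replaces A's single accumulator pass by a staged, axis-separated computation: a boolean visibility
-- mask, the first/last index of the active-row list, and a transposed column-by-column scan;
-- on ragged grids whose visible cells all lie right of row 0's width A's min_col is clamped wrongly, B returns the true minimum (see D_).

-- ===== PORT A =====
-- int(cell.get(k, 0)); parse failure (ValueError) is excluded by Pre_, .getD 0 is never reached there
def pvClue (cell : List (String × String)) (k : String) : Int :=
  match cell.lookup k with
  | none => 0
  | some s => (PySem.Int.ofStr? s).getD 0

-- the visibility test, identical lines in A and in B's helper _visible
def pvVisible (cell : List (String × String)) : Bool :=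
  let clue_h := pvClue cell "clue_h"
  let clue_v := pvClue cell "clue_v"
  let ctype := PySem.Str.upper ((cell.lookup "type").getD "white")
  (ctype == "WHITE" || ctype == "INPUT") || clue_h > 0 || clue_v > 0

def get_active_board_bounds (board_json : List (String × List (List (List (String × String))))) (cell_size : Int) : Int × Int × Int × Int :=
  let grid := (board_json.lookup "grid").getD []    -- KeyError excluded by Pre_
  -- state (min_r, max_r, min_c, max_c, found_any); len(grid[0]) raises on empty grid, excluded by Pre_
  let st := (PySem.List.enumerate grid 0).foldl (fun st rr =>
      (PySem.List.enumerate rr.2 0).foldl (fun st cc =>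
        if pvVisible cc.2 then
          (min st.1 rr.1, max st.2.1 rr.1, min st.2.2.1 cc.1, max st.2.2.2.1 cc.1, true)
        else st) st)
    (((grid.length : Int), (-1 : Int), ((grid.headD []).length : Int), (-1 : Int), false) : Int × Int × Int × Int × Bool)
  if st.2.2.2.2 = false then (0, 0, 0, 0)
  else (st.2.2.1, st.2.2.2.1, st.1, st.2.1)

-- ===== PORT B =====
-- mask = [[_visible(cell) for cell in row] for row in grid]
def pvMask (grid : List (List (List (String × String)))) : List (List Bool) :=
  grid.map (fun row => row.map pvVisible)

-- rows = [r for r in range(len(mask)) if any(mask[r])]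
def pvRows (grid : List (List (List (String × String)))) : List Int :=
  (PySem.List.pyRange 0 ((pvMask grid).length : Int) 1).filter
    (fun r => ((PySem.List.pyGet? (pvMask grid) r).getD []).any id)

-- width = max(len(row) for row in mask)  (guarded: only evaluated when rows nonempty, so mask nonempty)
def pvWidth (grid : List (List (List (String × String)))) : Int :=
  (PySem.List.max? ((pvMask grid).map (fun row => (row.length : Int))) (fun y => y)).getD 0

-- cols = [c for c in range(width) if any(c < len(row) and row[c] for row in mask)]
def pvCols (grid : List (List (List (String × String)))) : List Int :=
  (PySem.List.pyRange 0 (pvWidth grid) 1).filter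
    (fun c => (pvMask grid).any
      (fun row => decide (c < (row.length : Int)) && ((PySem.List.pyGet? row c).getD false)))

def get_active_board_bounds_alt (board_json : List (String × List (List (List (String × String))))) (cell_size : Int) : Int × Int × Int × Int :=
  let grid := (board_json.lookup "grid").getD []
  let rows := pvRows grid
  if rows.isEmpty then (0, 0, 0, 0)
  else
    let cols := pvCols grid
    ((PySem.List.pyGet? cols 0).getD 0, (PySem.List.pyGet? cols (-1)).getD 0,
     (PySem.List.pyGet? rows 0).getD 0, (PySem.List.pyGet? rows (-1)).getD 0)

-- ===== PRECONDITION & SPEC =====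
def pvClueOk (cell : List (String × String)) (k : String) : Bool :=
  match cell.lookup k with
  | none => true
  | some s => (PySem.Int.ofStr? s).isSome

def pvPre (board_json : List (String × List (List (List (String × String))))) : Bool :=
  match board_json.lookup "grid" with
  | none => false
  | some grid => !grid.isEmpty &&
      grid.all (fun row => row.all (fun cell => pvClueOk cell "clue_h" && pvClueOk cell "clue_v"))

-- Pre_ excludes exactly the inputs where A raises: missing 'grid' key (KeyError), empty grid (IndexError on grid[0]),
-- or a clue_h/clue_v string that int() rejects (ValueError).
def Pre_get_active_board_bounds (board_json : List (String × List (List (List (String × String))))) (cell_size : Int) : Prop :=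
  pvPre board_json = true
instance (board_json : List (String × List (List (List (String × String))))) (cell_size : Int) : Decidable (Pre_get_active_board_bounds board_json cell_size) := by unfold Pre_get_active_board_bounds; infer_instance

def pvWitness_get_active_board_bounds : (List (String × List (List (List (String × String))))) × Int :=
  ([("grid", [[[("type", "white")]]])], 0)

-- On ragged grids where some cell is visible but every visible cell's column exceeds row 0's length, A returns
-- min_col = len(grid[0]) (its stale initial value, the column of no visible cell) while B returns the true minimum
-- visible column, which is the intended bounding box.
def pvD (board_json : List (String × List (List (List (String × String))))) : Bool :=
  match board_json.lookup "grid" with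
  | none => false
  | some grid =>
    let L : Int := ((grid.headD []).length : Int)
    (grid.any (fun row => row.any pvVisible)) &&
    (grid.all (fun row => (PySem.List.enumerate row 0).all (fun cc => !pvVisible cc.2 || decide (L < cc.1))))

def D_get_active_board_bounds (board_json : List (String × List (List (List (String × String))))) (cell_size : Int) : Prop :=
  pvD board_json = true
instance (board_json : List (String × List (List (List (String × String))))) (cell_size : Int) : Decidable (D_get_active_board_bounds board_json cell_size) := by unfold D_get_active_board_bounds; infer_instance

def Spec_get_active_board_bounds (board_json : List (String × List (List (List (String × String))))) (cell_size : Int) (out : Int × Int × Int × Int) : Prop :=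
  ¬ D_get_active_board_bounds board_json cell_size → out = get_active_board_bounds_alt board_json cell_size
instance (board_json : List (String × List (List (List (String × String))))) (cell_size : Int) (out : Int × Int × Int × Int) : Decidable (Spec_get_active_board_bounds board_json cell_size out) := by unfold Spec_get_active_board_bounds; infer_instance

def pvDiffWitness_get_active_board_bounds : (List (String × List (List (List (String × String))))) × Int :=
  ([("grid", [[], [[("type", "block")], [("type", "white")]]])], 0)
def pvDiffWitnessOut_get_active_board_bounds : (Int × Int × Int × Int) × (Int × Int × Int × Int) :=
  ((0, 1, 1, 1), (1, 1, 1, 1))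

-- ===== CLAIM (what is proved, stated in full; the proofs are below) =====
def Claim_unchanged_get_active_board_bounds : Prop := ∀ (board_json : List (String × List (List (List (String × String))))) (cell_size : Int), Dom_get_active_board_bounds board_json cell_size → Pre_get_active_board_bounds board_json cell_size → Spec_get_active_board_bounds board_json cell_size (get_active_board_bounds board_json cell_size)
def Claim_changed_get_active_board_bounds : Prop := Dom_get_active_board_bounds (pvDiffWitness_get_active_board_bounds.1) (pvDiffWitness_get_active_board_bounds.2) ∧ Pre_get_active_board_bounds (pvDiffWitness_get_active_board_bounds.1) (pvDiffWitness_get_active_board_bounds.2) ∧ D_get_active_board_bounds (pvDiffWitness_get_active_board_bounds.1) (pvDiffWitness_get_active_board_bounds.2) ∧ get_active_board_bounds (pvDiffWitness_get_active_board_bounds.1) (pvDiffWitness_get_active_board_bounds.2) = pvDiffWitnessOut_get_active_board_bounds.1 ∧ get_active_board_bounds_alt (pvDiffWitness_get_active_board_bounds.1) (pvDiffWitness_get_active_board_bounds.2) = pvDiffWitnessOut_get_active_board_bounds.2 ∧ pvDiffWitnessOut_get_active_board_bounds.1 ≠ pvDiffWitnessOut_get_active_board_bounds.2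
def Claim_exact_get_active_board_bounds : Prop := ∀ (board_json : List (String × List (List (List (String × String))))) (cell_size : Int), Dom_get_active_board_bounds board_json cell_size → Pre_get_active_board_bounds board_json cell_size → D_get_active_board_bounds board_json cell_size → get_active_board_bounds board_json cell_size ≠ get_active_board_bounds_alt board_json cell_size

-- ===== LEMMAS AND PROOFS =====

-- the list of visible-cell coordinates; proof-side bridge between the two ports
def pvCells (grid : List (List (List (String × String)))) : List (Int × Int) :=
  (PySem.List.enumerate grid 0).flatMap (fun rr =>
    (PySem.List.enumerate rr.2 0).filterMap (fun cc =>
      if pvVisible cc.2 then some (rr.1, cc.1) else none))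

def pvStep (st : Int × Int × Int × Int × Bool) (x : Int × Int) : Int × Int × Int × Int × Bool :=
  (min st.1 x.1, max st.2.1 x.1, min st.2.2.1 x.2, max st.2.2.2.1 x.2, true)

theorem pv_foldl_filterMap_if {α β σ : Type} (p : α → Bool) (g : α → β) (f : σ → β → σ) :
    ∀ (l : List α) (st : σ), l.foldl (fun st x => if p x then f st (g x) else st) st
      = (l.filterMap (fun x => if p x then some (g x) else none)).foldl f st := by
  intro l
  induction l with
  | nil => intro st; rfl
  | cons x t ih =>
    intro st
    by_cases hp : p x = true <;> simp [hp, ih]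

theorem pv_foldl_flatMap {α β σ : Type} (g : α → List β) (f : σ → β → σ) :
    ∀ (l : List α) (st : σ), l.foldl (fun st x => (g x).foldl f st) st = (l.flatMap g).foldl f st := by
  intro l
  induction l with
  | nil => intro st; rfl
  | cons x t ih => intro st; simp [List.flatMap_cons, List.foldl_append, ih]

theorem pv_foldl_step : ∀ (L : List (Int × Int)) (a b c d : Int) (f : Bool),
    L.foldl pvStep (a, b, c, d, f)
      = ((L.map (·.1)).foldl min a, (L.map (·.1)).foldl max b,
         (L.map (·.2)).foldl min c, (L.map (·.2)).foldl max d, f || !L.isEmpty) := by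
  intro L
  induction L with
  | nil => intro a b c d f; simp
  | cons x t ih => intro a b c d f; simp [pvStep, ih]

theorem pv_foldl_min_init : ∀ (t : List Int) (a x : Int), t.foldl min (min a x) = min a (t.foldl min x) := by
  intro t
  induction t with
  | nil => intro a x; rfl
  | cons y t ih =>
    intro a x
    show t.foldl min (min (min a x) y) = min a (t.foldl min (min x y))
    rw [min_assoc, ih]

theorem pv_foldl_max_init : ∀ (t : List Int) (a x : Int), t.foldl max (max a x) = max a (t.foldl max x) := by
  intro t
  induction t with
  | nil => intro a x; rfl
  | cons y t ih =>
    intro a x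
    show t.foldl max (max (max a x) y) = max a (t.foldl max (max x y))
    rw [max_assoc, ih]

-- A's state fold equals the fold of pvStep over the coordinate list
theorem pv_A_fold_eq (grid : List (List (List (String × String)))) (init : Int × Int × Int × Int × Bool) :
    (PySem.List.enumerate grid 0).foldl (fun st rr =>
      (PySem.List.enumerate rr.2 0).foldl (fun st cc =>
        if pvVisible cc.2 then
          (min st.1 rr.1, max st.2.1 rr.1, min st.2.2.1 cc.1, max st.2.2.2.1 cc.1, true)
        else st) st) init
    = (pvCells grid).foldl pvStep init := by
  unfold pvCells
  rw [← pv_foldl_flatMap]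
  congr 1
  funext st rr
  have hbody := pv_foldl_filterMap_if (fun cc : Int × List (String × String) => pvVisible cc.2)
    (fun cc => (rr.1, cc.1)) pvStep (PySem.List.enumerate rr.2 0) st
  simpa only [pvStep] using hbody

theorem pv_mem_cells {grid : List (List (List (String × String)))} {rc : Int × Int}
    (h : rc ∈ pvCells grid) :
    ∃ (i : Nat) (hi : i < grid.length) (j : Nat) (hj : j < grid[i].length),
      rc = ((i : Int), (j : Int)) ∧ pvVisible grid[i][j] = true := by
  unfold pvCells at h
  rw [List.mem_flatMap] at h
  obtain ⟨rr, hrr, hmem⟩ := h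
  rw [List.mem_filterMap] at hmem
  obtain ⟨cc, hcc, hsome⟩ := hmem
  rw [PySem.List.mem_enumerate_iff] at hrr
  obtain ⟨i, hi, hrr⟩ := hrr
  subst hrr
  rw [PySem.List.mem_enumerate_iff] at hcc
  obtain ⟨j, hj, hcc⟩ := hcc
  subst hcc
  by_cases hv : pvVisible grid[i][j] = true
  · simp [hv] at hsome
    exact ⟨i, hi, j, hj, by simp [← hsome], hv⟩
  · simp [hv] at hsome

theorem pv_cells_ne_nil {grid : List (List (List (String × String)))}
    {i j : Nat} (hi : i < grid.length) (hj : j < grid[i].length)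
    (hv : pvVisible grid[i][j] = true) : ((i : Int), (j : Int)) ∈ pvCells grid := by
  unfold pvCells
  rw [List.mem_flatMap]
  refine ⟨((i : Int), grid[i]), ?_, ?_⟩
  · rw [PySem.List.mem_enumerate_iff]
    exact ⟨i, hi, by simp⟩
  · rw [List.mem_filterMap]
    refine ⟨((j : Int), grid[i][j]), ?_, by simp [hv]⟩
    rw [PySem.List.mem_enumerate_iff]
    exact ⟨j, hj, by simp⟩

-- the common shape of both ports' results, in terms of the cells list
theorem pv_A_closed (board_json : List (String × List (List (List (String × String))))) (cell_size : Int) :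
    get_active_board_bounds board_json cell_size =
      (let grid := (board_json.lookup "grid").getD []
       match pvCells grid with
       | [] => (0, 0, 0, 0)
       | x :: t =>
         (min ((grid.headD []).length : Int) ((t.map (·.2)).foldl min x.2),
          max (-1) ((t.map (·.2)).foldl max x.2),
          min (grid.length : Int) ((t.map (·.1)).foldl min x.1),
          max (-1) ((t.map (·.1)).foldl max x.1))) := by
  simp only [get_active_board_bounds, pv_A_fold_eq]
  cases h : pvCells ((board_json.lookup "grid").getD []) with
  | nil => simp [h, pv_foldl_step]
  | cons x t =>
    rw [pv_foldl_step]
    simp [pv_foldl_min_init, pv_foldl_max_init]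

-- ===== B-side characterisation =====

-- every row index of pvRows names a row with a visible cell, and conversely
theorem pv_mem_rows {grid : List (List (List (String × String)))} {y : Int} :
    y ∈ pvRows grid ↔ ∃ rc ∈ pvCells grid, rc.1 = y := by
  unfold pvRows pvMask
  rw [List.mem_filter, PySem.List.mem_pyRange_one]
  constructor
  · rintro ⟨⟨hy0, hylt⟩, hp⟩
    lift y to Nat using hy0 with i
    simp only [List.length_map, Nat.cast_lt] at hylt
    rw [PySem.List.pyGet?_natCast] at hp
    have hi : i < (grid.map (fun row => row.map pvVisible)).length := by simpa using hylt
    rw [List.getElem?_eq_getElem hi] at hp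
    simp only [Option.getD_some, List.getElem_map, List.any_eq_true, id_eq] at hp
    obtain ⟨b, hb, hbtrue⟩ := hp
    rw [List.mem_map] at hb
    obtain ⟨cell, hcell, hcb⟩ := hb
    rw [List.mem_iff_getElem] at hcell
    obtain ⟨j, hj, hcell⟩ := hcell
    refine ⟨((i : Int), (j : Int)), pv_cells_ne_nil hylt hj ?_, rfl⟩
    rw [hcell, hcb, hbtrue]
  · rintro ⟨rc, hrc, hrc1⟩
    obtain ⟨i, hi, j, hj, heq, hv⟩ := pv_mem_cells hrc
    subst heq
    simp only at hrc1
    subst hrc1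
    refine ⟨⟨by positivity, by simpa using hi⟩, ?_⟩
    rw [PySem.List.pyGet?_natCast]
    have hi' : i < (grid.map (fun row => row.map pvVisible)).length := by simpa using hi
    rw [List.getElem?_eq_getElem hi']
    simp only [Option.getD_some, List.getElem_map, List.any_eq_true, id_eq]
    exact ⟨pvVisible grid[i][j], List.mem_map.mpr ⟨grid[i][j], List.getElem_mem hj, rfl⟩, hv⟩

-- row lengths are bounded by pvWidth
theorem pv_len_le_width {grid : List (List (List (String × String)))} {i : Nat}
    (hi : i < grid.length) : (grid[i].length : Int) ≤ pvWidth grid := by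
  unfold pvWidth pvMask
  have hmem : (grid[i].length : Int) ∈ (grid.map (fun row => row.map pvVisible)).map
      (fun row => (row.length : Int)) := by
    rw [List.mem_map]
    exact ⟨grid[i].map pvVisible, List.mem_map.mpr ⟨grid[i], List.getElem_mem hi, rfl⟩, by simp⟩
  cases hm : PySem.List.max? ((grid.map (fun row => row.map pvVisible)).map
      (fun row => (row.length : Int))) (fun y => y) with
  | none =>
    exfalso
    rw [PySem.List.max?_eq_none_iff] at hm
    rw [hm] at hmem
    exact List.not_mem_nil hmem
  | some m =>
    have := PySem.List.max?_isMax hm _ hmem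
    simpa using this

theorem pv_mem_cols {grid : List (List (List (String × String)))} {y : Int} :
    y ∈ pvCols grid ↔ ∃ rc ∈ pvCells grid, rc.2 = y := by
  unfold pvCols
  rw [List.mem_filter, PySem.List.mem_pyRange_one]
  constructor
  · rintro ⟨⟨hy0, _⟩, hp⟩
    rw [List.any_eq_true] at hp
    obtain ⟨row, hrow, hq⟩ := hp
    unfold pvMask at hrow
    rw [List.mem_map] at hrow
    obtain ⟨grow, hgrow, hroweq⟩ := hrow
    rw [List.mem_iff_getElem] at hgrow
    obtain ⟨i, hi, hgrow⟩ := hgrow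
    rw [Bool.and_eq_true, decide_eq_true_eq] at hq
    obtain ⟨hlt, hget⟩ := hq
    lift y to Nat using hy0 with j
    have hjlen : j < row.length := by exact_mod_cast hlt
    rw [PySem.List.pyGet?_natCast, List.getElem?_eq_getElem hjlen] at hget
    simp only [Option.getD_some] at hget
    have hjg : j < grid[i].length := by
      rw [hgrow]
      have hlen := congrArg List.length hroweq
      simp only [List.length_map] at hlen
      omega
    refine ⟨((i : Int), (j : Int)), pv_cells_ne_nil hi hjg ?_, rfl⟩
    have hrj : row[j] = pvVisible grid[i][j] := by
      subst hgrow
      subst hroweq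
      simp
    rw [← hrj, hget]
  · rintro ⟨rc, hrc, hrc2⟩
    obtain ⟨i, hi, j, hj, heq, hv⟩ := pv_mem_cells hrc
    subst heq
    simp only at hrc2
    subst hrc2
    have hjw : ((j : Int)) < pvWidth grid :=
      lt_of_lt_of_le (by exact_mod_cast hj) (pv_len_le_width hi)
    refine ⟨⟨by positivity, hjw⟩, ?_⟩
    rw [List.any_eq_true]
    refine ⟨grid[i].map pvVisible, ?_, ?_⟩
    · unfold pvMask
      exact List.mem_map.mpr ⟨grid[i], List.getElem_mem hi, rfl⟩
    · rw [Bool.and_eq_true, decide_eq_true_eq]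
      constructor
      · simpa using (show ((j : Int)) < (grid[i].length : Int) by exact_mod_cast hj)
      · rw [PySem.List.pyGet?_natCast]
        have hj' : j < (grid[i].map pvVisible).length := by simpa using hj
        rw [List.getElem?_eq_getElem hj']
        simpa using hv

theorem pv_rows_pairwise (grid : List (List (List (String × String)))) :
    (pvRows grid).Pairwise (· < ·) :=
  (PySem.List.pairwise_lt_pyRange_one _ _).filter _

theorem pv_cols_pairwise (grid : List (List (List (String × String)))) :
    (pvCols grid).Pairwise (· < ·) :=
  (PySem.List.pairwise_lt_pyRange_one _ _).filter _

theorem pv_min_mem {x : Int} {t : List Int} : t.foldl min x ∈ x :: t := by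
  have h := PySem.List.min?_mem (xs := x :: t) (key := fun y => y) (m := t.foldl min x)
    (by rw [PySem.List.min?_id_cons])
  exact h

theorem pv_min_isMin {x : Int} {t : List Int} : ∀ y ∈ x :: t, t.foldl min x ≤ y := by
  intro y hy
  exact PySem.List.min?_isMin (xs := x :: t) (key := fun y => y) (m := t.foldl min x)
    (by rw [PySem.List.min?_id_cons]) y hy

theorem pv_max_mem {x : Int} {t : List Int} : t.foldl max x ∈ x :: t := by
  exact PySem.List.max?_mem (xs := x :: t) (key := fun y => y) (m := t.foldl max x)
    (by rw [PySem.List.max?_id_cons])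

theorem pv_max_isMax {x : Int} {t : List Int} : ∀ y ∈ x :: t, y ≤ t.foldl max x := by
  intro y hy
  exact PySem.List.max?_isMax (xs := x :: t) (key := fun y => y) (m := t.foldl max x)
    (by rw [PySem.List.max?_id_cons]) y hy

-- on a strictly increasing list, head bounds below and getLast bounds above
theorem pv_head_le {f : Int} {F : List Int} (hp : (f :: F).Pairwise (· < ·)) :
    ∀ y ∈ f :: F, f ≤ y := by
  intro y hy
  rw [List.mem_cons] at hy
  rcases hy with hy | hy
  · exact le_of_eq hy.symm
  · exact le_of_lt ((List.pairwise_cons.mp hp).1 y hy)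

theorem pv_le_getLast : ∀ (F : List Int) (h : F ≠ []), F.Pairwise (· < ·) →
    ∀ y ∈ F, y ≤ F.getLast h := by
  intro F
  induction F with
  | nil => intro h; exact absurd rfl h
  | cons f t ih =>
    intro h hp y hy
    cases t with
    | nil => simp at hy; simp [hy]
    | cons g s =>
      rw [List.getLast_cons (by simp)]
      rcases List.mem_cons.mp hy with hy | hy
      · subst hy
        exact le_of_lt ((List.pairwise_cons.mp hp).1 _ (List.getLast_mem (by simp)))
      · exact ih (by simp) (List.pairwise_cons.mp hp).2 y hy

-- first/last element of a strictly increasing list with the same members as x :: t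
theorem pv_extrema {F : List Int} {x : Int} {t : List Int}
    (hp : F.Pairwise (· < ·)) (hmem : ∀ y, y ∈ F ↔ y ∈ x :: t) :
    (PySem.List.pyGet? F 0).getD 0 = t.foldl min x ∧
    (PySem.List.pyGet? F (-1)).getD 0 = t.foldl max x := by
  have hmF : t.foldl min x ∈ F := (hmem _).mpr pv_min_mem
  have hMF : t.foldl max x ∈ F := (hmem _).mpr pv_max_mem
  obtain ⟨f, F', hF⟩ := List.exists_cons_of_ne_nil (List.ne_nil_of_mem hmF)
  subst hF
  constructor
  · rw [PySem.List.pyGet?_zero]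
    simp only [List.getElem?_cons_zero, Option.getD_some]
    exact le_antisymm (pv_head_le hp _ hmF) (pv_min_isMin f ((hmem f).mp List.mem_cons_self))
  · rw [PySem.List.pyGet?_neg_one]
    have hne : f :: F' ≠ [] := by simp
    rw [List.getLast?_eq_some_getLast hne]
    simp only [Option.getD_some]
    exact le_antisymm
      (pv_max_isMax _ ((hmem _).mp (List.getLast_mem hne)))
      (pv_le_getLast _ hne hp _ hMF)

-- rows is empty iff there is no visible cell
theorem pv_rows_nil_iff {grid : List (List (List (String × String)))} :
    pvRows grid = [] ↔ pvCells grid = [] := by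
  constructor
  · intro h
    rw [List.eq_nil_iff_forall_not_mem]
    intro rc hrc
    have : rc.1 ∈ pvRows grid := pv_mem_rows.mpr ⟨rc, hrc, rfl⟩
    rw [h] at this
    exact List.not_mem_nil this
  · intro h
    rw [List.eq_nil_iff_forall_not_mem]
    intro y hy
    obtain ⟨rc, hrc, _⟩ := pv_mem_rows.mp hy
    rw [h] at hrc
    exact List.not_mem_nil hrc

theorem pv_B_closed (board_json : List (String × List (List (List (String × String))))) (cell_size : Int) :
    get_active_board_bounds_alt board_json cell_size =
      (let grid := (board_json.lookup "grid").getD []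
       match pvCells grid with
       | [] => (0, 0, 0, 0)
       | x :: t =>
         ((t.map (·.2)).foldl min x.2, (t.map (·.2)).foldl max x.2,
          (t.map (·.1)).foldl min x.1, (t.map (·.1)).foldl max x.1)) := by
  simp only [get_active_board_bounds_alt]
  set grid := (board_json.lookup "grid").getD [] with hg
  cases h : pvCells grid with
  | nil =>
    have : pvRows grid = [] := pv_rows_nil_iff.mpr h
    simp [this]
  | cons x t =>
    have hne : pvRows grid ≠ [] := by
      intro hnil
      rw [pv_rows_nil_iff.mp hnil] at h
      exact List.cons_ne_nil _ _ h.symm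
    rw [if_neg (by simpa [List.isEmpty_iff] using hne)]
    have hmemr : ∀ y, y ∈ pvRows grid ↔ y ∈ x.1 :: t.map (·.1) := by
      intro y
      rw [pv_mem_rows, h]
      constructor
      · rintro ⟨rc, hrc, hrc1⟩
        rw [List.mem_cons] at hrc
        rcases hrc with hrc | hrc
        · exact List.mem_cons.mpr (Or.inl (by rw [← hrc1, hrc]))
        · exact List.mem_cons.mpr (Or.inr (List.mem_map.mpr ⟨rc, hrc, hrc1⟩))
      · intro hy
        rw [List.mem_cons] at hy
        rcases hy with hy | hy
        · exact ⟨x, List.mem_cons_self, hy.symm⟩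
        · obtain ⟨rc, hrc, hrc1⟩ := List.mem_map.mp hy
          exact ⟨rc, List.mem_cons_of_mem _ hrc, hrc1⟩
    have hmemc : ∀ y, y ∈ pvCols grid ↔ y ∈ x.2 :: t.map (·.2) := by
      intro y
      rw [pv_mem_cols, h]
      constructor
      · rintro ⟨rc, hrc, hrc2⟩
        rw [List.mem_cons] at hrc
        rcases hrc with hrc | hrc
        · exact List.mem_cons.mpr (Or.inl (by rw [← hrc2, hrc]))
        · exact List.mem_cons.mpr (Or.inr (List.mem_map.mpr ⟨rc, hrc, hrc2⟩))
      · intro hy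
        rw [List.mem_cons] at hy
        rcases hy with hy | hy
        · exact ⟨x, List.mem_cons_self, hy.symm⟩
        · obtain ⟨rc, hrc, hrc2⟩ := List.mem_map.mp hy
          exact ⟨rc, List.mem_cons_of_mem _ hrc, hrc2⟩
    obtain ⟨hr1, hr2⟩ := pv_extrema (pv_rows_pairwise grid) hmemr
    obtain ⟨hc1, hc2⟩ := pv_extrema (pv_cols_pairwise grid) hmemc
    rw [hr1, hr2, hc1, hc2]

-- row bounds: every first coordinate lies in [0, len grid), second in [0, ∞)
theorem pv_bounds {grid : List (List (List (String × String)))} {rc : Int × Int}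
    (h : rc ∈ pvCells grid) : 0 ≤ rc.1 ∧ rc.1 < (grid.length : Int) ∧ 0 ≤ rc.2 := by
  obtain ⟨i, hi, j, hj, heq, _⟩ := pv_mem_cells h
  subst heq
  refine ⟨by simp, ?_, by simp⟩
  show ((i : Int), (j : Int)).1 < (grid.length : Int)
  simp only []
  exact_mod_cast hi

-- pvD's column clause transferred to the cells list
theorem pv_D_cols {board_json : List (String × List (List (List (String × String))))}
    (grid : List (List (List (String × String)))) (hg : (board_json.lookup "grid").getD [] = grid)
    (hgs : board_json.lookup "grid" = some grid)
    (hD : pvD board_json = true) :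
    ∀ rc ∈ pvCells grid, ((grid.headD []).length : Int) < rc.2 := by
  intro rc hrc
  unfold pvD at hD
  rw [hgs] at hD
  simp only [Bool.and_eq_true, List.all_eq_true] at hD
  obtain ⟨i, hi, j, hj, heq, hv⟩ := pv_mem_cells hrc
  have hrow := hD.2 grid[i] (by exact List.getElem_mem hi)
  have hcell := hrow ((j : Int), grid[i][j]) (by rw [PySem.List.mem_enumerate_iff]; exact ⟨j, hj, by simp⟩)
  simp only [hv, Bool.not_true, Bool.false_or, decide_eq_true_eq] at hcell
  rw [heq]
  exact hcell

theorem pv_notD_cols {board_json : List (String × List (List (List (String × String))))}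
    (grid : List (List (List (String × String)))) (hgs : board_json.lookup "grid" = some grid)
    (hD : ¬ pvD board_json = true) (hne : pvCells grid ≠ []) :
    ∃ rc ∈ pvCells grid, rc.2 ≤ ((grid.headD []).length : Int) := by
  unfold pvD at hD
  rw [hgs] at hD
  simp only [Bool.and_eq_true, not_and, List.all_eq_true, List.any_eq_true] at hD
  obtain ⟨rc, hrc⟩ := List.exists_mem_of_ne_nil _ hne
  obtain ⟨i, hi, j, hj, _, hv⟩ := pv_mem_cells hrc
  have hany : ∃ row ∈ grid, ∃ cell ∈ row, pvVisible cell = true :=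
    ⟨grid[i], List.getElem_mem hi, grid[i][j], List.getElem_mem hj, hv⟩
  have := hD hany
  push_neg at this
  obtain ⟨row, hrow, hbad⟩ := this
  rw [List.mem_iff_getElem] at hrow
  obtain ⟨i', hi', hrow⟩ := hrow
  obtain ⟨cc, hcc, hccbad⟩ := hbad
  rw [PySem.List.mem_enumerate_iff] at hcc
  obtain ⟨j', hj', hcc⟩ := hcc
  subst hcc
  subst hrow
  have hkey : pvVisible (grid[i'])[j'] = true ∧ ¬((((grid.headD []).length : Nat) : Int) < 0 + (j' : Int)) := by
    by_cases hv : pvVisible (grid[i'])[j'] = true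
    · refine ⟨hv, fun hlt => hccbad ?_⟩
      simp only [hv, Bool.not_true, Bool.false_or, decide_eq_true_eq]
      exact hlt
    · exact absurd (by simp [hv]) hccbad
  refine ⟨((i' : Int), (j' : Int)), pv_cells_ne_nil hi' hj' hkey.1, ?_⟩
  have h2 := hkey.2
  show (j' : Int) ≤ ((grid.headD []).length : Int)
  omega

-- ===== VERDICT (by name: the statement is the Claim_ definition above) =====
theorem get_active_board_bounds_spec : Claim_unchanged_get_active_board_bounds := by
  intro board_json cell_size _ _ hD
  rw [pv_A_closed, pv_B_closed]
  simp only []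
  set grid := (board_json.lookup "grid").getD [] with hg
  cases h : pvCells grid with
  | nil => rfl
  | cons x t =>
    have hgs : board_json.lookup "grid" = some grid := by
      cases hl : board_json.lookup "grid" with
      | none =>
        exfalso
        have : pvCells grid = [] := by rw [hg, hl]; rfl
        rw [h] at this; exact List.cons_ne_nil _ _ this
      | some g => rw [hg, hl]; rfl
    have hxmem : x ∈ pvCells grid := by rw [h]; exact List.mem_cons_self
    have hmr := pv_min_mem (x := x.1) (t := t.map (·.1))
    have hMr := pv_max_mem (x := x.1) (t := t.map (·.1))
    have hMc := pv_max_mem (x := x.2) (t := t.map (·.2))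
    have hrowsmem : ∀ y ∈ x.1 :: (t.map (·.1)), 0 ≤ y ∧ y < (grid.length : Int) := by
      intro y hy
      rw [List.mem_cons] at hy
      rcases hy with hy | hy
      · exact hy ▸ ⟨(pv_bounds hxmem).1, (pv_bounds hxmem).2.1⟩
      · obtain ⟨rc, hrc, hrc2⟩ := List.mem_map.mp hy
        have hm : rc ∈ pvCells grid := by rw [h]; exact List.mem_cons_of_mem _ hrc
        exact hrc2 ▸ ⟨(pv_bounds hm).1, (pv_bounds hm).2.1⟩
    have hcolsmem : ∀ y ∈ x.2 :: (t.map (·.2)), 0 ≤ y := by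
      intro y hy
      rw [List.mem_cons] at hy
      rcases hy with hy | hy
      · exact hy ▸ (pv_bounds hxmem).2.2
      · obtain ⟨rc, hrc, hrc2⟩ := List.mem_map.mp hy
        have hm : rc ∈ pvCells grid := by rw [h]; exact List.mem_cons_of_mem _ hrc
        exact hrc2 ▸ (pv_bounds hm).2.2
    have h1 : min ((grid.headD []).length : Int) ((t.map (·.2)).foldl min x.2)
        = (t.map (·.2)).foldl min x.2 := by
      obtain ⟨rc, hrc, hle⟩ := pv_notD_cols grid hgs hD (by rw [h]; exact List.cons_ne_nil _ _)
      have hmem2 : rc.2 ∈ x.2 :: (t.map (·.2)) := by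
        rw [h, List.mem_cons] at hrc
        rcases hrc with hrc | hrc
        · rw [List.mem_cons]; exact Or.inl (by rw [hrc])
        · exact List.mem_cons_of_mem _ (List.mem_map.mpr ⟨rc, hrc, rfl⟩)
      exact min_eq_right (le_trans (pv_min_isMin _ hmem2) hle)
    have h2 : max (-1 : Int) ((t.map (·.2)).foldl max x.2) = (t.map (·.2)).foldl max x.2 :=
      max_eq_right (le_trans (by norm_num) (hcolsmem _ hMc))
    have h3 : min (grid.length : Int) ((t.map (·.1)).foldl min x.1) = (t.map (·.1)).foldl min x.1 :=
      min_eq_right (le_of_lt (hrowsmem _ hmr).2)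
    have h4 : max (-1 : Int) ((t.map (·.1)).foldl max x.1) = (t.map (·.1)).foldl max x.1 :=
      max_eq_right (le_trans (by norm_num) (hrowsmem _ hMr).1)
    show (min ((grid.headD []).length : Int) ((t.map (·.2)).foldl min x.2),
          max (-1 : Int) ((t.map (·.2)).foldl max x.2),
          min (grid.length : Int) ((t.map (·.1)).foldl min x.1),
          max (-1 : Int) ((t.map (·.1)).foldl max x.1)) =
         ((t.map (·.2)).foldl min x.2, (t.map (·.2)).foldl max x.2,
          (t.map (·.1)).foldl min x.1, (t.map (·.1)).foldl max x.1)
    rw [h1, h2, h3, h4]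

theorem get_active_board_bounds_changed : Claim_changed_get_active_board_bounds := by
  unfold Claim_changed_get_active_board_bounds; decide

theorem get_active_board_bounds_tight : Claim_exact_get_active_board_bounds := by
  intro board_json cell_size _ _ hD
  rw [pv_A_closed, pv_B_closed]
  simp only []
  set grid := (board_json.lookup "grid").getD [] with hg
  have hgs : board_json.lookup "grid" = some grid := by
    unfold D_get_active_board_bounds pvD at hD
    cases hl : board_json.lookup "grid" with
    | none => rw [hl] at hD; exact absurd hD (by simp)
    | some g => rw [hg, hl]; rfl
  cases h : pvCells grid with
  | nil =>
    exfalso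
    unfold D_get_active_board_bounds pvD at hD
    rw [hgs] at hD
    simp only [Bool.and_eq_true, List.any_eq_true] at hD
    obtain ⟨row, hrow, cell, hcell, hv⟩ := hD.1
    rw [List.mem_iff_getElem] at hrow
    obtain ⟨i, hi, hrow⟩ := hrow
    subst hrow
    rw [List.mem_iff_getElem] at hcell
    obtain ⟨j, hj, hcell⟩ := hcell
    subst hcell
    have hm := pv_cells_ne_nil (grid := grid) hi hj hv
    rw [h] at hm
    exact List.not_mem_nil hm
  | cons x t =>
    have hall := pv_D_cols grid hg.symm hgs hD
    have hmem := pv_min_mem (x := x.2) (t := t.map (·.2))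
    have hlt : ((grid.headD []).length : Int) < (t.map (·.2)).foldl min x.2 := by
      rw [List.mem_cons] at hmem
      rcases hmem with hm | hm
      · have := hall x (by rw [h]; exact List.mem_cons_self)
        rw [← hm] at this
        exact this
      · obtain ⟨rc, hrc, hrc2⟩ := List.mem_map.mp hm
        exact hrc2 ▸ hall rc (by rw [h]; exact List.mem_cons_of_mem _ hrc)
    intro heq
    have heq' : (min ((grid.headD []).length : Int) ((t.map (·.2)).foldl min x.2),
          max (-1 : Int) ((t.map (·.2)).foldl max x.2),
          min (grid.length : Int) ((t.map (·.1)).foldl min x.1),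
          max (-1 : Int) ((t.map (·.1)).foldl max x.1)) =
         ((t.map (·.2)).foldl min x.2, (t.map (·.2)).foldl max x.2,
          (t.map (·.1)).foldl min x.1, (t.map (·.1)).foldl max x.1) := heq
    have hfirst : min ((grid.headD []).length : Int) ((t.map (·.2)).foldl min x.2)
        = (t.map (·.2)).foldl min x.2 := congrArg Prod.fst heq'
    rw [min_eq_left (le_of_lt hlt)] at hfirst
    exact absurd hfirst (ne_of_lt hlt)
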